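/-
  GENERATED by c/gen_labels.py from the tables of the image base (FUNCTIONS LOOPS CHECKS insns sym; the BASE only (the same in every program)) and units.tsv
  -- do not edit; re-run the script when the image is rebuilt.

  `ProgX.Base.L.<function>.<label>`: a name for every code address of the image that a statement or a proof cites.
  Statements and proofs cite these names, never the numbers: a rebuild that only shifts code changes this file alone.
  Per function: entry, size (bytes), insns (instructions), cut<k> (the addresses the units table cites: segment
  entries, exits, cut points), loop<k> (loop heads), ret<k> (the return address of the k-th call), chk<k> (the call
  instruction of the k-th check site). One address may have several names.
-/
import X86.Derived.User.State
namespace ProgX.Base.L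
open X86

-- the image
abbrev textLo : Nat := 0x100000  -- __text_start: the first byte of code
abbrev textHi : Nat := 0x140000  -- __text_cap: the end of the text window, THE SAME IN EVERY PROGRAM
abbrev report : Word := 0x100059  -- __asan_report: where a failed check goes
abbrev exit : Word := 0x100056  -- prog_exit: the `hlt` the run ends at

abbrev _start.entry : Word := 0x100000
abbrev _start.size : Nat := 89  -- bytes of code: 0x100000 .. 0x100059
abbrev _start.insns : Nat := 13  -- instructions
abbrev _start.cut1 : Word := 0x100005  -- mov rdi,QWORD PTR ds:0x1ff000 | cut in _start |
abbrev _start.cut2 : Word := 0x10003a  -- mov QWORD PTR ds:0x1ff020,rax | cut in _start |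
abbrev _start.ret1 : Word := 0x100005  -- after the call at 0x100000 of run_ctors |
abbrev _start.ret2 : Word := 0x10003a  -- after the call at 0x100035 of prog_main |

abbrev __asan_report.entry : Word := 0x100059
abbrev __asan_report.size : Nat := 64  -- bytes of code: 0x100059 .. 0x100099
abbrev __asan_report.insns : Nat := 10  -- instructions

abbrev range_bad.entry : Word := 0x100200  -- asan_rt.c:60 word last = addr + size - 1;
abbrev range_bad.size : Nat := 105  -- bytes of code: 0x100200 .. 0x100269
abbrev range_bad.insns : Nat := 32  -- instructions
abbrev range_bad.cut1 : Word := 0x100225  -- mov rax,rdx | cut in range_bad | asan_rt.c:68 for (g = addr >> 3; g < (last >> 3); g++) {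
abbrev range_bad.loop1 : Word := 0x100225  -- loop head: mov rax,rdx | asan_rt.c:68 for (g = addr >> 3; g < (last >> 3); g++) {

abbrev __asan_load1_noabort.entry : Word := 0x100300  -- asan_rt.c:46 if (addr >= MEM_TOP - 16) {
abbrev __asan_load1_noabort.size : Nat := 56  -- bytes of code: 0x100300 .. 0x100338
abbrev __asan_load1_noabort.insns : Nat := 16  -- instructions
abbrev __asan_load1_noabort.ret1 : Word := 0x100338  -- after the call at 0x100333 of __asan_report (the call is the last instruction: nothing of t…

abbrev __asan_store1_noabort.entry : Word := 0x1003c0  -- asan_rt.c:46 if (addr >= MEM_TOP - 16) {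
abbrev __asan_store1_noabort.size : Nat := 56  -- bytes of code: 0x1003c0 .. 0x1003f8
abbrev __asan_store1_noabort.insns : Nat := 16  -- instructions
abbrev __asan_store1_noabort.ret1 : Word := 0x1003f8  -- after the call at 0x1003f3 of __asan_report (the call is the last instruction: nothing of…

abbrev __asan_load2_noabort.entry : Word := 0x100480  -- asan_rt.c:46 if (addr >= MEM_TOP - 16) {
abbrev __asan_load2_noabort.size : Nat := 79  -- bytes of code: 0x100480 .. 0x1004cf
abbrev __asan_load2_noabort.insns : Nat := 22  -- instructions
abbrev __asan_load2_noabort.ret1 : Word := 0x1004cf  -- after the call at 0x1004ca of __asan_report (the call is the last instruction: nothing of t…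

abbrev __asan_store2_noabort.entry : Word := 0x100560  -- asan_rt.c:46 if (addr >= MEM_TOP - 16) {
abbrev __asan_store2_noabort.size : Nat := 79  -- bytes of code: 0x100560 .. 0x1005af
abbrev __asan_store2_noabort.insns : Nat := 22  -- instructions
abbrev __asan_store2_noabort.ret1 : Word := 0x1005af  -- after the call at 0x1005aa of __asan_report (the call is the last instruction: nothing of…

abbrev __asan_load4_noabort.entry : Word := 0x100640  -- asan_rt.c:46 if (addr >= MEM_TOP - 16) {
abbrev __asan_load4_noabort.size : Nat := 79  -- bytes of code: 0x100640 .. 0x10068f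
abbrev __asan_load4_noabort.insns : Nat := 22  -- instructions
abbrev __asan_load4_noabort.ret1 : Word := 0x10068f  -- after the call at 0x10068a of __asan_report (the call is the last instruction: nothing of t…

abbrev __asan_store4_noabort.entry : Word := 0x100720  -- asan_rt.c:46 if (addr >= MEM_TOP - 16) {
abbrev __asan_store4_noabort.size : Nat := 79  -- bytes of code: 0x100720 .. 0x10076f
abbrev __asan_store4_noabort.insns : Nat := 22  -- instructions
abbrev __asan_store4_noabort.ret1 : Word := 0x10076f  -- after the call at 0x10076a of __asan_report (the call is the last instruction: nothing of…

abbrev __asan_load8_noabort.entry : Word := 0x100800  -- asan_rt.c:46 if (addr >= MEM_TOP - 16) {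
abbrev __asan_load8_noabort.size : Nat := 79  -- bytes of code: 0x100800 .. 0x10084f
abbrev __asan_load8_noabort.insns : Nat := 22  -- instructions
abbrev __asan_load8_noabort.ret1 : Word := 0x10084f  -- after the call at 0x10084a of __asan_report (the call is the last instruction: nothing of t…

abbrev __asan_store8_noabort.entry : Word := 0x1008e0  -- asan_rt.c:46 if (addr >= MEM_TOP - 16) {
abbrev __asan_store8_noabort.size : Nat := 79  -- bytes of code: 0x1008e0 .. 0x10092f
abbrev __asan_store8_noabort.insns : Nat := 22  -- instructions
abbrev __asan_store8_noabort.ret1 : Word := 0x10092f  -- after the call at 0x10092a of __asan_report (the call is the last instruction: nothing of…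

abbrev __asan_load16_noabort.entry : Word := 0x1009c0  -- asan_rt.c:93 void __asan_load16_noabort(word addr) {
abbrev __asan_load16_noabort.size : Nat := 38  -- bytes of code: 0x1009c0 .. 0x1009e6
abbrev __asan_load16_noabort.insns : Nat := 12  -- instructions
abbrev __asan_load16_noabort.cut1 : Word := 0x1009ce  -- test eax,eax | cut in __asan_load16_noabort | asan_rt.c:94 if (range_bad(addr, 16)) {
abbrev __asan_load16_noabort.ret1 : Word := 0x1009ce  -- after the call at 0x1009c9 of range_bad | asan_rt.c:94 if (range_bad(addr, 16)) {
abbrev __asan_load16_noabort.ret2 : Word := 0x1009e6  -- after the call at 0x1009e1 of __asan_report (the call is the last instruction: nothing of…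

abbrev __asan_store16_noabort.entry : Word := 0x100a80  -- asan_rt.c:99 void __asan_store16_noabort(word addr) {
abbrev __asan_store16_noabort.size : Nat := 38  -- bytes of code: 0x100a80 .. 0x100aa6
abbrev __asan_store16_noabort.insns : Nat := 12  -- instructions
abbrev __asan_store16_noabort.cut1 : Word := 0x100a8e  -- test eax,eax | cut in __asan_store16_noabort | asan_rt.c:100 if (range_bad(addr, 16)) {
abbrev __asan_store16_noabort.ret1 : Word := 0x100a8e  -- after the call at 0x100a89 of range_bad | asan_rt.c:100 if (range_bad(addr, 16)) {
abbrev __asan_store16_noabort.ret2 : Word := 0x100aa6  -- after the call at 0x100aa1 of __asan_report (the call is the last instruction: nothing of…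

abbrev __asan_storeN_noabort.entry : Word := 0x100b40  -- asan_rt.c:115 if (size == 0) {
abbrev __asan_storeN_noabort.size : Nat := 50  -- bytes of code: 0x100b40 .. 0x100b72
abbrev __asan_storeN_noabort.insns : Nat := 19  -- instructions
abbrev __asan_storeN_noabort.cut1 : Word := 0x100b57  -- test eax,eax | cut in __asan_storeN_noabort | asan_rt.c:118 if (range_bad(addr, size)) {
abbrev __asan_storeN_noabort.ret1 : Word := 0x100b57  -- after the call at 0x100b52 of range_bad | asan_rt.c:118 if (range_bad(addr, size)) {
abbrev __asan_storeN_noabort.ret2 : Word := 0x100b72  -- after the call at 0x100b6d of __asan_report (the call is the last instruction: nothing of…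

abbrev arena_unpoison.entry : Word := 0x100c00  -- asan_rt.c:131 word g = addr >> 3;
abbrev arena_unpoison.size : Nat := 40  -- bytes of code: 0x100c00 .. 0x100c28
abbrev arena_unpoison.insns : Nat := 11  -- instructions
abbrev arena_unpoison.cut1 : Word := 0x100c15  -- cmp rsi,0x7 | cut in arena_unpoison | asan_rt.c:132 while (size >= 8) {
abbrev arena_unpoison.loop1 : Word := 0x100c15  -- loop head: cmp rsi,0x7 | asan_rt.c:132 while (size >= 8) {

abbrev arena_poison.entry : Word := 0x100cc0  -- asan_rt.c:144 word g = addr >> 3;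
abbrev arena_poison.size : Nat := 27  -- bytes of code: 0x100cc0 .. 0x100cdb
abbrev arena_poison.insns : Nat := 8  -- instructions
abbrev arena_poison.cut1 : Word := 0x100cd5  -- test rsi,rsi | cut in arena_poison | asan_rt.c:145 while (size > 0) {
abbrev arena_poison.loop1 : Word := 0x100cd5  -- loop head: test rsi,rsi | asan_rt.c:145 while (size > 0) {

abbrev __asan_register_globals.entry : Word := 0x100d60  -- asan_rt.c:167 for (i = 0; i < n; i++) {
abbrev __asan_register_globals.size : Nat := 97  -- bytes of code: 0x100d60 .. 0x100dc1
abbrev __asan_register_globals.insns : Nat := 28  -- instructions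
abbrev __asan_register_globals.cut1 : Word := 0x100d7a  -- cmp rax,rcx | cut in __asan_register_globals | asan_rt.c:174 while (a < stop) {
abbrev __asan_register_globals.cut2 : Word := 0x100d83  -- cmp r8,rsi | cut in __asan_register_globals | asan_rt.c:167 for (i = 0; i < n; i++) {
abbrev __asan_register_globals.loop1 : Word := 0x100d7a  -- loop head: cmp rax,rcx | asan_rt.c:174 while (a < stop) {
abbrev __asan_register_globals.loop2 : Word := 0x100d83  -- loop head: cmp r8,rsi | asan_rt.c:167 for (i = 0; i < n; i++) {

abbrev run_ctors.entry : Word := 0x100e60  -- asan_rt.c:191 void run_ctors(void) {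
abbrev run_ctors.size : Nat := 25  -- bytes of code: 0x100e60 .. 0x100e79
abbrev run_ctors.insns : Nat := 9  -- instructions
abbrev run_ctors.cut1 : Word := 0x100e6a  -- add rbx,0x8 | cut in run_ctors | asan_rt.c:193 for (p = __init_array_start; p < __init_array_end; p++)…
abbrev run_ctors.cut2 : Word := 0x100e6e  -- cmp rbx,0x141008 | cut in run_ctors | asan_rt.c:193 for (p = __init_array_start; p < __init_array_end;…
abbrev run_ctors.loop1 : Word := 0x100e6e  -- loop head: cmp rbx,0x141008 | asan_rt.c:193 for (p = __init_array_start; p < __init_array_end; p++) {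
abbrev run_ctors.ret1 : Word := 0x100e6a  -- after the call at 0x100e68 of indirect: call QWORD PTR [rbx] | asan_rt.c:194 (*p)();

abbrev __asan_loadN_noabort.entry : Word := 0x100f00  -- asan_rt.c:106 if (size == 0) {
abbrev __asan_loadN_noabort.size : Nat := 50  -- bytes of code: 0x100f00 .. 0x100f32
abbrev __asan_loadN_noabort.insns : Nat := 19  -- instructions
abbrev __asan_loadN_noabort.ret1 : Word := 0x100f17  -- after the call at 0x100f12 of range_bad | asan_rt.c:109 if (range_bad(addr, size)) {
abbrev __asan_loadN_noabort.ret2 : Word := 0x100f32  -- after the call at 0x100f2d of __asan_report (the call is the last instruction: nothing of t…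

abbrev __asan_handle_no_return.entry : Word := 0x100fc0  -- asan_rt.c:124 }
abbrev __asan_handle_no_return.size : Nat := 1  -- bytes of code: 0x100fc0 .. 0x100fc1
abbrev __asan_handle_no_return.insns : Nat := 1  -- instructions

abbrev __asan_unregister_globals.entry : Word := 0x101060  -- asan_rt.c:184 }
abbrev __asan_unregister_globals.size : Nat := 1  -- bytes of code: 0x101060 .. 0x101061
abbrev __asan_unregister_globals.insns : Nat := 1  -- instructions

abbrev swap_bytes.entry : Word := 0x101200  -- libc.c:59 static void swap_bytes(unsigned char *a, unsigned char *b, size_t width) {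
abbrev swap_bytes.size : Nat := 102  -- bytes of code: 0x101200 .. 0x101266
abbrev swap_bytes.insns : Nat := 34  -- instructions
abbrev swap_bytes.cut1 : Word := 0x101252  -- cmp rbx,r14 | cut in swap_bytes | libc.c:61 for (i = 0; i < width; i++) {
abbrev swap_bytes.loop1 : Word := 0x101252  -- loop head: cmp rbx,r14 | libc.c:61 for (i = 0; i < width; i++) {
abbrev swap_bytes.ret1 : Word := 0x10122c  -- after the call at 0x101227 of __asan_load1_noabort | libc.c:62 unsigned char t = a[i];
abbrev swap_bytes.ret2 : Word := 0x101242  -- after the call at 0x10123d of __asan_load1_noabort | libc.c:63 a[i] = b[i];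
abbrev swap_bytes.chk1 : Word := 0x101227  -- call __asan_load1_noabort; then movzx r13d,BYTE PTR [r12] | libc.c:62 unsigned char t = a[i];
abbrev swap_bytes.chk2 : Word := 0x10123d  -- call __asan_load1_noabort; then movzx eax,BYTE PTR [rbp+0x0] | libc.c:63 a[i] = b[i];

abbrev sift_down.entry : Word := 0x101300  -- libc.c:69 size_t width, cmp_fn cmp) {
abbrev sift_down.size : Nat := 156  -- bytes of code: 0x101300 .. 0x10139c
abbrev sift_down.insns : Nat := 55  -- instructions
abbrev sift_down.cut1 : Word := 0x10133f  -- test eax,eax | cut in sift_down | libc.c:80 if (cmp(base + root * width, base + child * width) >= 0) {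
abbrev sift_down.cut2 : Word := 0x101351  -- mov rbx,r12 | cut in sift_down | libc.c:84 root = child;
abbrev sift_down.cut3 : Word := 0x101354  -- lea r12,[rbx+rbx*1+0x1] | cut in sift_down | libc.c:71 size_t child = 2 * root + 1;
abbrev sift_down.cut4 : Word := 0x101384  -- test eax,eax | cut in sift_down | libc.c:76 if (cmp(base + child * width, base + (child + 1) * width)…
abbrev sift_down.loop1 : Word := 0x101354  -- loop head: lea r12,[rbx+rbx*1+0x1] | libc.c:71 size_t child = 2 * root + 1;
abbrev sift_down.ret1 : Word := 0x10133f  -- after the call at 0x10133d of indirect: call rax | libc.c:80 if (cmp(base + root * width, base + child…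
abbrev sift_down.ret2 : Word := 0x101351  -- after the call at 0x10134c of swap_bytes | libc.c:83 swap_bytes(base + root * width, base + child * wi…
abbrev sift_down.ret3 : Word := 0x101384  -- after the call at 0x101382 of indirect: call rax | libc.c:76 if (cmp(base + child * width, base + (chi…

abbrev memcpy.entry : Word := 0x101440  -- libc.c:7 void *memcpy(void *dst, const void *src, size_t n) {
abbrev memcpy.size : Nat := 91  -- bytes of code: 0x101440 .. 0x10149b
abbrev memcpy.insns : Nat := 32  -- instructions
abbrev memcpy.cut1 : Word := 0x101484  -- cmp rbx,r14 | cut in memcpy | libc.c:11 for (i = 0; i < n; i++) {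
abbrev memcpy.loop1 : Word := 0x101484  -- loop head: cmp rbx,r14 | libc.c:11 for (i = 0; i < n; i++) {
abbrev memcpy.ret1 : Word := 0x10146f  -- after the call at 0x10146a of __asan_load1_noabort | libc.c:12 d[i] = s[i];
abbrev memcpy.ret2 : Word := 0x10147c  -- after the call at 0x101477 of __asan_store1_noabort | libc.c:12 d[i] = s[i];
abbrev memcpy.chk1 : Word := 0x10146a  -- call __asan_load1_noabort; then movzx r12d,BYTE PTR [r12] | libc.c:12 d[i] = s[i];
abbrev memcpy.chk2 : Word := 0x101477  -- call __asan_store1_noabort; then mov BYTE PTR [rbp+0x0],r12b | libc.c:12 d[i] = s[i];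

abbrev memset.entry : Word := 0x101520  -- libc.c:17 void *memset(void *dst, int c, size_t n) {
abbrev memset.size : Nat := 61  -- bytes of code: 0x101520 .. 0x10155d
abbrev memset.insns : Nat := 24  -- instructions
abbrev memset.cut1 : Word := 0x10154c  -- cmp rbx,r13 | cut in memset | libc.c:20 for (i = 0; i < n; i++) {
abbrev memset.loop1 : Word := 0x10154c  -- loop head: cmp rbx,r13 | libc.c:20 for (i = 0; i < n; i++) {
abbrev memset.ret1 : Word := 0x101544  -- after the call at 0x10153f of __asan_store1_noabort | libc.c:21 d[i] = (unsigned char) c;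
abbrev memset.chk1 : Word := 0x10153f  -- call __asan_store1_noabort; then mov BYTE PTR [rbp+0x0],r14b | libc.c:21 d[i] = (unsigned char) c;

abbrev memcmp.entry : Word := 0x1015e0  -- libc.c:26 int memcmp(const void *a, const void *b, size_t n) {
abbrev memcmp.size : Nat := 109  -- bytes of code: 0x1015e0 .. 0x10164d
abbrev memcmp.insns : Nat := 38  -- instructions
abbrev memcmp.cut1 : Word := 0x101602  -- cmp rbx,r12 | cut in memcmp | libc.c:30 for (i = 0; i < n; i++) {
abbrev memcmp.loop1 : Word := 0x101602  -- loop head: cmp rbx,r12 | libc.c:30 for (i = 0; i < n; i++) {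
abbrev memcmp.ret1 : Word := 0x101613  -- after the call at 0x10160e of __asan_load1_noabort | libc.c:31 if (p[i] != q[i]) {
abbrev memcmp.ret2 : Word := 0x101625  -- after the call at 0x101620 of __asan_load1_noabort | libc.c:31 if (p[i] != q[i]) {
abbrev memcmp.chk1 : Word := 0x10160e  -- call __asan_load1_noabort; then movzx r15d,BYTE PTR [rbp+0x0] | libc.c:31 if (p[i] != q[i]) {
abbrev memcmp.chk2 : Word := 0x101620  -- call __asan_load1_noabort; then movzx edx,BYTE PTR [rbp+0x0] | libc.c:31 if (p[i] != q[i]) {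

abbrev abs.entry : Word := 0x1016e0  -- libc.c:38 int abs(int x) {
abbrev abs.size : Nat := 11  -- bytes of code: 0x1016e0 .. 0x1016eb
abbrev abs.insns : Nat := 6  -- instructions

abbrev qsort.entry : Word := 0x1018c0  -- libc.c:92 if (n < 2) {
abbrev qsort.size : Nat := 131  -- bytes of code: 0x1018c0 .. 0x101943
abbrev qsort.insns : Nat := 47  -- instructions
abbrev qsort.cut1 : Word := 0x1018fa  -- test r13,r13 | cut in qsort | libc.c:95 for (i = n / 2; i > 0; i--) {
abbrev qsort.cut2 : Word := 0x10191a  -- mov r8,r14 | cut in qsort | libc.c:100 sift_down(base, 0, end, width, cmp);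
abbrev qsort.cut3 : Word := 0x101930  -- sub rbx,0x1 | cut in qsort | libc.c:98 for (end = n - 1; end > 0; end--) {
abbrev qsort.cut4 : Word := 0x101934  -- test rbx,rbx | cut in qsort | libc.c:98 for (end = n - 1; end > 0; end--) {
abbrev qsort.loop1 : Word := 0x1018fa  -- loop head: test r13,r13 | libc.c:95 for (i = n / 2; i > 0; i--) {
abbrev qsort.loop2 : Word := 0x101934  -- loop head: test rbx,rbx | libc.c:98 for (end = n - 1; end > 0; end--) {
abbrev qsort.ret1 : Word := 0x1018fa  -- after the call at 0x1018f5 of sift_down | libc.c:96 sift_down(base, i - 1, n, width, cmp);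
abbrev qsort.ret2 : Word := 0x10191a  -- after the call at 0x101915 of swap_bytes | libc.c:99 swap_bytes(base, base + end * width, width);
abbrev qsort.ret3 : Word := 0x101930  -- after the call at 0x10192b of sift_down | libc.c:100 sift_down(base, 0, end, width, cmp);

abbrev two_to.entry : Word := 0x101d00  -- libm.c:18 b.u = (u64) (n + 1023) << 52;
abbrev two_to.size : Nat := 16  -- bytes of code: 0x101d00 .. 0x101d10
abbrev two_to.insns : Nat := 4  -- instructions

abbrev pow_int.entry : Word := 0x101da0  -- libm.c:146 double r = 1.0;
abbrev pow_int.size : Nat := 37  -- bytes of code: 0x101da0 .. 0x101dc5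
abbrev pow_int.insns : Nat := 12  -- instructions
abbrev pow_int.cut1 : Word := 0x101db0  -- test edi,edi | cut in pow_int | libm.c:147 while (n != 0) {
abbrev pow_int.loop1 : Word := 0x101db0  -- loop head: test edi,edi | libm.c:147 while (n != 0) {

abbrev sin_poly.entry : Word := 0x101e60  -- libm.c:179 double z = r * r;
abbrev sin_poly.size : Nat := 225  -- bytes of code: 0x101e60 .. 0x101f41
abbrev sin_poly.insns : Nat := 47  -- instructions

abbrev cos_poly.entry : Word := 0x102040  -- libm.c:194 double z = r * r;
abbrev cos_poly.size : Nat := 221  -- bytes of code: 0x102040 .. 0x10211d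
abbrev cos_poly.insns : Nat := 46  -- instructions

abbrev ldexp.entry : Word := 0x102200  -- libm.c:22 double ldexp(double x, int n) {
abbrev ldexp.size : Nat := 186  -- bytes of code: 0x102200 .. 0x1022ba
abbrev ldexp.insns : Nat := 47  -- instructions
abbrev ldexp.cut1 : Word := 0x10221e  -- movsd xmm1,QWORD PTR [rsp] | cut in ldexp | libm.c:25 x = x * two_to(1023);
abbrev ldexp.cut2 : Word := 0x102269  -- movsd xmm3,QWORD PTR [rsp] | cut in ldexp | libm.c:35 x = x * two_to(-1022);
abbrev ldexp.cut3 : Word := 0x1022ab  -- mulsd xmm0,QWORD PTR [rsp] | cut in ldexp | libm.c:45 return x * two_to(n);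
abbrev ldexp.ret1 : Word := 0x10221e  -- after the call at 0x102219 of two_to | libm.c:25 x = x * two_to(1023);
abbrev ldexp.ret2 : Word := 0x102269  -- after the call at 0x102264 of two_to | libm.c:35 x = x * two_to(-1022);
abbrev ldexp.ret3 : Word := 0x1022ab  -- after the call at 0x1022a6 of two_to | libm.c:45 return x * two_to(n);

abbrev floor.entry : Word := 0x102380  -- libm.c:50 if (!(x > -4503599627370496.0 && x < 4503599627370496.0)) {
abbrev floor.size : Nat := 62  -- bytes of code: 0x102380 .. 0x1023be
abbrev floor.insns : Nat := 15  -- instructions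

abbrev sincos_quadrant.entry : Word := 0x102440  -- libm.c:214 if (!(x > -1073741824.0 && x < 1073741824.0)) {
abbrev sincos_quadrant.size : Nat := 190  -- bytes of code: 0x102440 .. 0x1024fe
abbrev sincos_quadrant.insns : Nat := 46  -- instructions
abbrev sincos_quadrant.cut1 : Word := 0x102488  -- movapd xmm1,xmm0 | cut in sincos_quadrant | libm.c:217 k = floor(x * TWO_OVER_PI + 0.5);
abbrev sincos_quadrant.cut2 : Word := 0x1024cb  -- xorpd xmm0,XMMWORD PTR [rip+0x3db2d] | cut in sincos_quadrant | libm.c:229 return -cos_poly(r);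
abbrev sincos_quadrant.cut3 : Word := 0x1024da  -- jmp 1024fb | cut in sincos_quadrant | libm.c:221 return sin_poly(r);
abbrev sincos_quadrant.cut4 : Word := 0x1024e1  -- jmp 1024fb | cut in sincos_quadrant | libm.c:224 return cos_poly(r);
abbrev sincos_quadrant.cut5 : Word := 0x1024e8  -- xorpd xmm0,XMMWORD PTR [rip+0x3db10] | cut in sincos_quadrant | libm.c:227 return -sin_poly(r);
abbrev sincos_quadrant.ret1 : Word := 0x102488  -- after the call at 0x102483 of floor | libm.c:217 k = floor(x * TWO_OVER_PI + 0.5);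
abbrev sincos_quadrant.ret2 : Word := 0x1024cb  -- after the call at 0x1024c6 of cos_poly | libm.c:229 return -cos_poly(r);
abbrev sincos_quadrant.ret3 : Word := 0x1024da  -- after the call at 0x1024d5 of sin_poly | libm.c:221 return sin_poly(r);
abbrev sincos_quadrant.ret4 : Word := 0x1024e1  -- after the call at 0x1024dc of cos_poly | libm.c:224 return cos_poly(r);
abbrev sincos_quadrant.ret5 : Word := 0x1024e8  -- after the call at 0x1024e3 of sin_poly | libm.c:227 return -sin_poly(r);

abbrev exp.entry : Word := 0x1025c0  -- libm.c:64 double exp(double x) {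
abbrev exp.size : Nat := 420  -- bytes of code: 0x1025c0 .. 0x102764
abbrev exp.insns : Nat := 85  -- instructions
abbrev exp.cut1 : Word := 0x1025ef  -- addsd xmm0,xmm0 | cut in exp | libm.c:73 return two_to(1023) * 2.0; /* +inf */
abbrev exp.cut2 : Word := 0x102628  -- movapd xmm2,xmm0 | cut in exp | libm.c:78 k = floor(x * INV_LN2 + 0.5);
abbrev exp.cut3 : Word := 0x102752  -- add rsp,0x8 | cut in exp | libm.c:95 }
abbrev exp.ret1 : Word := 0x1025ef  -- after the call at 0x1025ea of two_to | libm.c:73 return two_to(1023) * 2.0; /* +inf */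
abbrev exp.ret2 : Word := 0x102628  -- after the call at 0x102623 of floor | libm.c:78 k = floor(x * INV_LN2 + 0.5);
abbrev exp.ret3 : Word := 0x102752  -- after the call at 0x10274d of ldexp | libm.c:94 return ldexp(p, n);

abbrev log.entry : Word := 0x102920  -- libm.c:97 double log(double x) {
abbrev log.size : Nat := 443  -- bytes of code: 0x102920 .. 0x102adb
abbrev log.insns : Nat := 89  -- instructions
abbrev log.cut1 : Word := 0x10296c  -- movq xmm7,rbx | cut in log | libm.c:116 b.d = x * two_to(54);
abbrev log.cut2 : Word := 0x102aad  -- addsd xmm0,xmm0 | cut in log | libm.c:106 return -(two_to(1023) * 2.0); /* -inf */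
abbrev log.ret1 : Word := 0x10296c  -- after the call at 0x102967 of two_to | libm.c:116 b.d = x * two_to(54);
abbrev log.ret2 : Word := 0x102aad  -- after the call at 0x102aa8 of two_to | libm.c:106 return -(two_to(1023) * 2.0); /* -inf */

abbrev pow.entry : Word := 0x102ca0  -- libm.c:157 double pow(double x, double y) {
abbrev pow.size : Nat := 136  -- bytes of code: 0x102ca0 .. 0x102d28
abbrev pow.insns : Nat := 38  -- instructions
abbrev pow.cut1 : Word := 0x102d0f  -- jmp 102d05 | cut in pow | libm.c:161 return pow_int(x, n);
abbrev pow.cut2 : Word := 0x102d16  -- mulsd xmm0,QWORD PTR [rsp] | cut in pow | libm.c:165 return exp(y * log(x));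
abbrev pow.cut3 : Word := 0x102d20  -- jmp 102d05 | cut in pow | libm.c:165 return exp(y * log(x));
abbrev pow.ret1 : Word := 0x102d0f  -- after the call at 0x102d0a of pow_int | libm.c:161 return pow_int(x, n);
abbrev pow.ret2 : Word := 0x102d16  -- after the call at 0x102d11 of log | libm.c:165 return exp(y * log(x));
abbrev pow.ret3 : Word := 0x102d20  -- after the call at 0x102d1b of exp | libm.c:165 return exp(y * log(x));

abbrev sin.entry : Word := 0x102dc0  -- libm.c:233 return sincos_quadrant(x, 0);
abbrev sin.size : Nat := 11  -- bytes of code: 0x102dc0 .. 0x102dcb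
abbrev sin.insns : Nat := 3  -- instructions
abbrev sin.cut1 : Word := 0x102dca  -- ret | cut in sin | libm.c:234 }
abbrev sin.ret1 : Word := 0x102dca  -- after the call at 0x102dc5 of sincos_quadrant | libm.c:233 return sincos_quadrant(x, 0);

abbrev cos.entry : Word := 0x102e60  -- libm.c:237 return sincos_quadrant(x, 1);
abbrev cos.size : Nat := 11  -- bytes of code: 0x102e60 .. 0x102e6b
abbrev cos.insns : Nat := 3  -- instructions
abbrev cos.cut1 : Word := 0x102e6a  -- ret | cut in cos | libm.c:238 }
abbrev cos.ret1 : Word := 0x102e6a  -- after the call at 0x102e65 of sincos_quadrant | libm.c:237 return sincos_quadrant(x, 1);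

abbrev malloc.entry : Word := 0x103200  -- heap.c:119 if (n > HEAP_ROOM) {
abbrev malloc.size : Nat := 37  -- bytes of code: 0x103200 .. 0x103225
abbrev malloc.insns : Nat := 10  -- instructions
abbrev malloc.ret1 : Word := 0x10321a  -- after the call at 0x103215 of heap_alloc | heap.c:123 return (void *) heap_alloc(n, cap);

abbrev calloc.entry : Word := 0x103500  -- heap.c:229 void *calloc(size_t nmemb, size_t size) {
abbrev calloc.size : Nat := 74  -- bytes of code: 0x103500 .. 0x10354a
abbrev calloc.insns : Nat := 25  -- instructions
abbrev calloc.ret1 : Word := 0x103511  -- after the call at 0x10350c of heap_product_ok | heap.c:232 if (!heap_product_ok(nmemb, size)) {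
abbrev calloc.ret2 : Word := 0x103521  -- after the call at 0x10351c of malloc | heap.c:236 q = malloc(total);
abbrev calloc.ret3 : Word := 0x103539  -- after the call at 0x103534 of memset | heap.c:240 memset(q, 0, total);

abbrev free.entry : Word := 0x103800  -- heap.c:154 if (p == 0) {
abbrev free.size : Nat := 36  -- bytes of code: 0x103800 .. 0x103824
abbrev free.insns : Nat := 12  -- instructions
abbrev free.ret1 : Word := 0x10380e  -- after the call at 0x103809 of heap_live_size | heap.c:157 size = heap_live_size(p);
abbrev free.ret2 : Word := 0x103821  -- after the call at 0x10381c of arena_poison | heap.c:160 arena_poison(p, (long) size);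

abbrev realloc.entry : Word := 0x103b00  -- heap.c:164 void *realloc(void *ptr, size_t n) {
abbrev realloc.size : Nat := 187  -- bytes of code: 0x103b00 .. 0x103bbb
abbrev realloc.insns : Nat := 58  -- instructions
abbrev realloc.cut1 : Word := 0x103b38  -- lea rsi,[r13+r13*1+0x0] | cut in realloc | heap.c:187 q = heap_alloc(n, 2 * need);
abbrev realloc.cut2 : Word := 0x103b5a  -- mov rbp,rax | cut in realloc | heap.c:194 memcpy((void *) q, ptr, old);
abbrev realloc.cut3 : Word := 0x103b73  -- mov rax,rbp | cut in realloc | heap.c:197 }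
abbrev realloc.cut4 : Word := 0x103b8e  -- mov QWORD PTR [rbx-0x20],rbp | cut in realloc | heap.c:181 h->size = n;
abbrev realloc.ret1 : Word := 0x103b1a  -- after the call at 0x103b15 of heap_live_size | heap.c:173 old = heap_live_size(p);
abbrev realloc.ret2 : Word := 0x103b45  -- after the call at 0x103b40 of heap_alloc | heap.c:187 q = heap_alloc(n, 2 * need);
abbrev realloc.ret3 : Word := 0x103b55  -- after the call at 0x103b50 of heap_alloc | heap.c:189 q = heap_alloc(n, need);
abbrev realloc.ret4 : Word := 0x103b6b  -- after the call at 0x103b66 of memcpy | heap.c:194 memcpy((void *) q, ptr, old);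
abbrev realloc.ret5 : Word := 0x103b73  -- after the call at 0x103b6e of free | heap.c:195 free(ptr);
abbrev realloc.ret6 : Word := 0x103b89  -- after the call at 0x103b84 of malloc | heap.c:171 return malloc(n);
abbrev realloc.ret7 : Word := 0x103b9d  -- after the call at 0x103b98 of arena_poison | heap.c:182 arena_poison(p, (long) old);
abbrev realloc.ret8 : Word := 0x103ba8  -- after the call at 0x103ba3 of arena_unpoison | heap.c:183 arena_unpoison(p, (long) n);

abbrev reallocarray.entry : Word := 0x103e00  -- heap.c:221 void *reallocarray(void *ptr, size_t nmemb, size_t size) {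
abbrev reallocarray.size : Nat := 55  -- bytes of code: 0x103e00 .. 0x103e37
abbrev reallocarray.insns : Nat := 21  -- instructions
abbrev reallocarray.ret1 : Word := 0x103e18  -- after the call at 0x103e13 of heap_product_ok | heap.c:222 if (!heap_product_ok(nmemb, size)) {
abbrev reallocarray.ret2 : Word := 0x103e2b  -- after the call at 0x103e26 of realloc | heap.c:225 return realloc(ptr, nmemb * size);

abbrev heap_alloc.entry : Word := 0x104100  -- heap.c:96 static word heap_alloc(word n, word cap) {
abbrev heap_alloc.size : Nat := 94  -- bytes of code: 0x104100 .. 0x10415e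
abbrev heap_alloc.insns : Nat := 21  -- instructions
abbrev heap_alloc.ret1 : Word := 0x10415c  -- after the call at 0x104157 of arena_unpoison | heap.c:112 arena_unpoison(p, (long) n);

abbrev heap_live_size.entry : Word := 0x104200  -- heap.c:129 static word heap_live_size(word p) {
abbrev heap_live_size.size : Nat := 117  -- bytes of code: 0x104200 .. 0x104275
abbrev heap_live_size.insns : Nat := 26  -- instructions
abbrev heap_live_size.ret1 : Word := 0x104248  -- after the call at 0x104243 of __asan_report | heap.c:134 __asan_report(p, 0, 2);
abbrev heap_live_size.ret2 : Word := 0x104257  -- after the call at 0x104252 of __asan_report | heap.c:137 __asan_report(p, 0, 2);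
abbrev heap_live_size.ret3 : Word := 0x104266  -- after the call at 0x104261 of __asan_report | heap.c:140 __asan_report(p, 0, 2);
abbrev heap_live_size.ret4 : Word := 0x104275  -- after the call at 0x104270 of __asan_report (the call is the last instruction: nothing of this fu…

abbrev heap_product_ok.entry : Word := 0x104300  -- heap.c:205 if (nmemb == 0) {
abbrev heap_product_ok.size : Nat := 58  -- bytes of code: 0x104300 .. 0x10433a
abbrev heap_product_ok.insns : Nat := 18  -- instructions

end ProgX.Base.L

-- Sanity checks: a wrong generator fails the build here.
example : ProgX.Base.L.memset.entry = 0x101520 := by decide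
example : ProgX.Base.L.memset.cut1 = 0x10154c := by decide
example : ProgX.Base.L.memset.loop1 = 0x10154c := by decide
example : ProgX.Base.L.memset.ret1 = 0x101544 := by decide
example : ProgX.Base.L.memset.chk1 = 0x10153f := by decide
example : ProgX.Base.L.report = 0x100059 := by decide
example : ProgX.Base.L.textHi = 0x140000 := by decide
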